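-- pv_equiv track=rewrite | github.com/DevMilovici/GeoFlowCraft | service.copernicus/stac_search.py | _get_relevant_assets
-- ===== SOURCE A (Python) =====
-- from typing import Dict, List, Any, Optional
--
-- def _get_relevant_assets(assets: Dict[str, Any]) -> Dict[str, str]:
--     relevant_assets = {}
--
--     band_names = [
--         "B01", "B02", "B03", "B04", "B05", "B06",
--         "B07", "B08", "B8A", "B09", "B11", "B12",
--         "visual", "true_color", "SCL", "AOT", "WVP"
--     ]
--
--     for band in band_names:
--         if band in assets:
--             relevant_assets[band] = assets[band].get("href", "")
--         elif band.lower() in assets: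
--             relevant_assets[band] = assets[band.lower()].get("href", "")
--
--     for key, asset in assets.items():
--         if "tif" in key.lower() or "geotiff" in key.lower():
--             relevant_assets[key] = asset.get("href", "")
--
--     return relevant_assets
-- ===== SOURCE B (Python) =====
-- def _get_relevant_assets(assets):
--     band_names = [
--         "B01", "B02", "B03", "B04", "B05", "B06",
--         "B07", "B08", "B8A", "B09", "B11", "B12",
--         "visual", "true_color", "SCL", "AOT", "WVP"
--     ]
--
--     # canonical-name index: every recognizable spelling -> the output band name
--     canon = {}
--     for b in band_names:
--         canon[b] = b
--         canon[b.lower()] = b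
--
--     exact = {}   # band -> href, keys that matched a band name exactly
--     low = {}     # band -> href, keys that matched only the lowercase spelling
--     tifs = []    # (key, href) for tif-like keys, in iteration order
--     for key, asset in assets.items():
--         href = asset.get("href", "")
--         c = canon.get(key)
--         if c is not None:
--             if key == c:
--                 exact.setdefault(c, href)
--             else:
--                 low.setdefault(c, href)
--         if "tif" in key.lower():
--             tifs.append((key, href))
--
--     result = {}
--     for b in band_names:
--         if b in exact:
--             result[b] = exact[b]
--         elif b in low:
--             result[b] = low[b]
--     for key, href in tifs:
--         result[key] = href
--     return result
-- ===== Notes on version B (the rewrite author's own statement) =====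
-- stated objective: alternative
-- what changed: B replaces A's per-band membership probes into the assets dict by a canonical-spelling index dict built once plus a single classifying pass over assets.items() that buckets keys into exact-band / lowercase-band / tif matches, assembling the result afterwards.
import Mathlib
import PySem

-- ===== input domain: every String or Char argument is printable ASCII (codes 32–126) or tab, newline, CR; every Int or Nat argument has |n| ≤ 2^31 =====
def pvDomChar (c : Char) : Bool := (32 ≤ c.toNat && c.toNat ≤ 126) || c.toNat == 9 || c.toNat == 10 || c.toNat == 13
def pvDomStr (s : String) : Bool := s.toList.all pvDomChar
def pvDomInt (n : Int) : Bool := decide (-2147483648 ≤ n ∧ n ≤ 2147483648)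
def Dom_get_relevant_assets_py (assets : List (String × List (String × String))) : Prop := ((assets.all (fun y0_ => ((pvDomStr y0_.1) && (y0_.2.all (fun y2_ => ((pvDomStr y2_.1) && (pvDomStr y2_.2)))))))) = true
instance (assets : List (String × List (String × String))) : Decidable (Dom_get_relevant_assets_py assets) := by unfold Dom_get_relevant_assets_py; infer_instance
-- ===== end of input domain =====

-- B replaces A's per-band membership probes of the assets dict by a canonical-spelling index dict
-- plus a single classifying pass over assets.items(); same asymptotic cost (objective: alternative).

-- ===== PORT A =====
def pvBandNames : List String :=
  ["B01", "B02", "B03", "B04", "B05", "B06",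
   "B07", "B08", "B8A", "B09", "B11", "B12",
   "visual", "true_color", "SCL", "AOT", "WVP"]
def get_relevant_assets_py (assets : List (String × List (String × String))) : List (String × String) :=
  let d : PySem.Dict String (List (String × String)) := PySem.Dict.mk assets
  let r0 : PySem.Dict String String :=
    pvBandNames.foldl (fun r band =>
      if d.contains band then
        r.insert band ((PySem.Dict.mk (d.getD band [])).getD "href" "")
      else if d.contains (PySem.Str.lower band) then
        r.insert band ((PySem.Dict.mk (d.getD (PySem.Str.lower band) [])).getD "href" "")
      else r) PySem.Dict.empty
  let r : PySem.Dict String String :=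
    d.items.foldl (fun r p =>
      if PySem.Str.isIn "tif" (PySem.Str.lower p.1) || PySem.Str.isIn "geotiff" (PySem.Str.lower p.1) then
        r.insert p.1 ((PySem.Dict.mk p.2).getD "href" "")
      else r) r0
  r.items


-- ===== PORT B =====
-- canon = {}; for b in band_names: canon[b] = b; canon[b.lower()] = b
def pvCanon : PySem.Dict String String :=
  pvBandNames.foldl (fun c b => (c.insert b b).insert (PySem.Str.lower b) b) PySem.Dict.empty
def pvAltStep
    (st : PySem.Dict String String × PySem.Dict String String × List (String × String))
    (p : String × List (String × String)) :
    PySem.Dict String String × PySem.Dict String String × List (String × String) :=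
  let href := (PySem.Dict.mk p.2).getD "href" ""
  let st1 :=
    match pvCanon.get? p.1 with
    | some c =>
        if p.1 = c then (st.1.setdefault c href, st.2.1, st.2.2)
        else (st.1, st.2.1.setdefault c href, st.2.2)
    | none => st
  if PySem.Str.isIn "tif" (PySem.Str.lower p.1) then (st1.1, st1.2.1, st1.2.2 ++ [(p.1, href)])
  else st1

def get_relevant_assets_py_alt (assets : List (String × List (String × String))) : List (String × String) :=
  let st := assets.foldl pvAltStep (PySem.Dict.empty, PySem.Dict.empty, [])
  let res0 : PySem.Dict String String :=
    pvBandNames.foldl (fun r b =>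
      if st.1.contains b then r.insert b (st.1.getD b "")
      else if st.2.1.contains b then r.insert b (st.2.1.getD b "")
      else r) PySem.Dict.empty
  let res := st.2.2.foldl (fun r q => r.insert q.1 q.2) res0
  res.items


-- ===== PRECONDITION & SPEC =====
def Spec_get_relevant_assets_py (assets : List (String × List (String × String))) (out : List (String × String)) : Prop := out = get_relevant_assets_py_alt assets
instance (assets : List (String × List (String × String))) (out : List (String × String)) : Decidable (Spec_get_relevant_assets_py assets out) := by unfold Spec_get_relevant_assets_py; infer_instance

-- ===== CLAIM (what is proved, stated in full; the proofs are below) =====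
def Claim_equal_get_relevant_assets_py : Prop := ∀ (assets : List (String × List (String × String))), Dom_get_relevant_assets_py assets → Spec_get_relevant_assets_py assets (get_relevant_assets_py assets)

-- ===== LEMMAS AND PROOFS =====

def pvFirstHref (k : String) (l : List (String × List (String × String))) : Option String :=
  (l.find? (fun p => p.1 == k)).map (fun p => (PySem.Dict.mk p.2).getD "href" "")


set_option maxRecDepth 40000 in
theorem pv_canon_self : ∀ b ∈ pvBandNames, pvCanon.get? b = some b := by decide
set_option maxRecDepth 40000 in
theorem pv_canon_lower : ∀ b ∈ pvBandNames, pvCanon.get? (PySem.Str.lower b) = some b := by decide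
set_option maxRecDepth 40000 in
theorem pv_canon_items : ∀ p ∈ pvCanon.items, p.1 = p.2 ∨ p.1 = PySem.Str.lower p.2 := by decide
theorem pv_canon_inv : ∀ (key c : String), pvCanon.get? key = some c →
    key = c ∨ key = PySem.Str.lower c := by
  intro key c h
  exact pv_canon_items (key, c) (PySem.Dict.mem_items_of_get?_eq_some _ h)

theorem pv_mk_get? {v : Type} (l : List (String × v)) (k : String) :
    (PySem.Dict.mk l).get? k = (l.find? (fun p => p.1 == k)).map Prod.snd := by
  induction l with
  | nil => rfl
  | cons p l ih =>
    rw [PySem.Dict.get?_mk_cons, List.find?_cons]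
    by_cases hp : p.1 = k
    · simp [hp]
    · have hb : (p.1 == k) = false := by simp [hp]
      simp [hb, ih]

theorem pv_get?_setdefault_of_ne (d : PySem.Dict String String) {k k' : String} (v : String)
    (h : k' ≠ k) : (d.setdefault k v).get? k' = d.get? k' := by
  by_cases hc : d.contains k
  · rw [PySem.Dict.setdefault_of_contains _ _ hc]
  · rw [PySem.Dict.setdefault_of_not_contains _ _ (by simpa using hc),
      PySem.Dict.get?_insert_of_ne _ _ h]

theorem pv_fold_tifs :
    ∀ (l : List (String × List (String × String)))
      (st : PySem.Dict String String × PySem.Dict String String × List (String × String)),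
    (l.foldl pvAltStep st).2.2 =
      st.2.2 ++ (l.filter (fun p => PySem.Str.isIn "tif" (PySem.Str.lower p.1))).map
        (fun p => (p.1, (PySem.Dict.mk p.2).getD "href" "")) := by
  intro l
  induction l with
  | nil => simp
  | cons p l ih =>
    intro st
    rw [List.foldl_cons, ih]
    have h22 : (pvAltStep st p).2.2 =
        if PySem.Str.isIn "tif" (PySem.Str.lower p.1)
        then st.2.2 ++ [(p.1, (PySem.Dict.mk p.2).getD "href" "")] else st.2.2 := by
      unfold pvAltStep
      cases h : pvCanon.get? p.1 <;> simp <;> split_ifs <;> simp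
    rw [h22, List.filter_cons]
    cases ht : PySem.Str.isIn "tif" (PySem.Str.lower p.1)
    · simp only [Bool.false_eq_true, if_false]
    · simp only [if_true, List.map_cons, List.append_assoc, List.singleton_append]

theorem pv_fold_exact (b : String) (hb : b ∈ pvBandNames) :
    ∀ (l : List (String × List (String × String)))
      (st : PySem.Dict String String × PySem.Dict String String × List (String × String)),
    ((l.foldl pvAltStep st).1).get? b = (st.1.get? b).or (pvFirstHref b l) := by
  intro l
  induction l with
  | nil => simp [pvFirstHref]
  | cons p l ih =>
    intro st
    rw [List.foldl_cons, ih]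
    by_cases hpb : p.1 = b
    · have h1 : (pvAltStep st p).1 = st.1.setdefault b ((PySem.Dict.mk p.2).getD "href" "") := by
        unfold pvAltStep
        rw [hpb, pv_canon_self b hb]
        simp
        split_ifs <;> rfl
      rw [h1, PySem.Dict.get?_setdefault_self]
      have hf : pvFirstHref b (p :: l) = some ((PySem.Dict.mk p.2).getD "href" "") := by
        simp [pvFirstHref, hpb]
      rw [hf]
      cases hs : st.1.get? b <;> simp [Option.or]
    · have h1 : (pvAltStep st p).1.get? b = st.1.get? b := by
        unfold pvAltStep
        cases h : pvCanon.get? p.1 with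
        | none => split_ifs <;> simp
        | some c =>
          by_cases hc : p.1 = c
          · subst hc
            simp
            split_ifs <;> exact pv_get?_setdefault_of_ne _ _ (Ne.symm hpb)
          · simp only [if_neg hc]
            split_ifs <;> rfl
      rw [h1]
      have hf : pvFirstHref b (p :: l) = pvFirstHref b l := by
        simp [pvFirstHref, hpb]
      rw [hf]

theorem pv_fold_low (b : String) (hb : b ∈ pvBandNames) :
    ∀ (l : List (String × List (String × String)))
      (st : PySem.Dict String String × PySem.Dict String String × List (String × String)),
    ((l.foldl pvAltStep st).2.1).get? b =
      (st.2.1.get? b).or (if PySem.Str.lower b = b then none else pvFirstHref (PySem.Str.lower b) l) := by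
  intro l
  induction l with
  | nil => simp [pvFirstHref]
  | cons p l ih =>
    intro st
    rw [List.foldl_cons, ih]
    by_cases hlb : PySem.Str.lower b = b
    · -- low is never written at b
      have h1 : (pvAltStep st p).2.1.get? b = st.2.1.get? b := by
        unfold pvAltStep
        cases h : pvCanon.get? p.1 with
        | none => split_ifs <;> simp
        | some c =>
          by_cases hc : p.1 = c
          · subst hc
            simp
            split_ifs <;> rfl
          · by_cases hcb : c = b
            · subst hcb
              rcases pv_canon_inv _ _ h with h' | h'
              · exact absurd h' hc
              · rw [hlb] at h'; exact absurd h' hc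
            · simp [hc]
              split_ifs <;> exact pv_get?_setdefault_of_ne _ _ (Ne.symm hcb)
      rw [h1, if_pos hlb, if_pos hlb]
    · by_cases hpl : p.1 = PySem.Str.lower b
      · have h1 : (pvAltStep st p).2.1 =
            st.2.1.setdefault b ((PySem.Dict.mk p.2).getD "href" "") := by
          unfold pvAltStep
          rw [hpl, pv_canon_lower b hb]
          have : ¬ (PySem.Str.lower b = b) := hlb
          simp [this]
          split_ifs <;> rfl
        rw [h1, PySem.Dict.get?_setdefault_self, if_neg hlb, if_neg hlb]
        have hf : pvFirstHref (PySem.Str.lower b) (p :: l) =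
            some ((PySem.Dict.mk p.2).getD "href" "") := by
          simp [pvFirstHref, hpl]
        rw [hf]
        cases hs : st.2.1.get? b <;> simp [Option.or]
      · have h1 : (pvAltStep st p).2.1.get? b = st.2.1.get? b := by
          unfold pvAltStep
          cases h : pvCanon.get? p.1 with
          | none => split_ifs <;> simp
          | some c =>
            by_cases hc : p.1 = c
            · simp [hc]
              split_ifs <;> rfl
            · by_cases hcb : c = b
              · subst hcb
                rcases pv_canon_inv _ _ h with h' | h'
                · exact absurd h' hc
                · exact absurd h' hpl
              · simp [hc]
                split_ifs <;> exact pv_get?_setdefault_of_ne _ _ (Ne.symm hcb)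
        rw [h1, if_neg hlb, if_neg hlb]
        have hf : pvFirstHref (PySem.Str.lower b) (p :: l) = pvFirstHref (PySem.Str.lower b) l := by
          simp [pvFirstHref, hpl]
        rw [hf]

theorem pv_tif_or_geotiff (s : String) :
    (PySem.Str.isIn "tif" s || PySem.Str.isIn "geotiff" s) = PySem.Str.isIn "tif" s := by
  cases hg : PySem.Str.isIn "geotiff" s
  · simp
  · have : PySem.Str.isIn "tif" s = true := by
      rw [PySem.Str.isIn_iff_infix] at hg ⊢
      exact List.IsInfix.trans (by decide) hg
    rw [this]
    decide

theorem pv_main (assets : List (String × List (String × String))) :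
    get_relevant_assets_py assets = get_relevant_assets_py_alt assets := by
  unfold get_relevant_assets_py get_relevant_assets_py_alt
  simp only
  set st := assets.foldl pvAltStep
    ((PySem.Dict.empty : PySem.Dict String String),
     (PySem.Dict.empty : PySem.Dict String String), ([] : List (String × String))) with hst
  have hex : ∀ b, b ∈ pvBandNames → st.1.get? b = pvFirstHref b assets := by
    intro b hb
    rw [hst, pv_fold_exact b hb assets _]
    simp [PySem.Dict.get?_empty, Option.or]
  have hlow : ∀ b, b ∈ pvBandNames → st.2.1.get? b =
      (if PySem.Str.lower b = b then none else pvFirstHref (PySem.Str.lower b) assets) := by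
    intro b hb
    rw [hst, pv_fold_low b hb assets _]
    simp [PySem.Dict.get?_empty, Option.or]
  have htifs : st.2.2 = (assets.filter (fun p => PySem.Str.isIn "tif" (PySem.Str.lower p.1))).map
      (fun p => (p.1, (PySem.Dict.mk p.2).getD "href" "")) := by
    rw [hst, pv_fold_tifs]; simp
  have hstep : ∀ (r : PySem.Dict String String), ∀ b ∈ pvBandNames,
      (if (PySem.Dict.mk assets).contains b then
         r.insert b ((PySem.Dict.mk ((PySem.Dict.mk assets).getD b [])).getD "href" "")
       else if (PySem.Dict.mk assets).contains (PySem.Str.lower b) then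
         r.insert b ((PySem.Dict.mk ((PySem.Dict.mk assets).getD (PySem.Str.lower b) [])).getD "href" "")
       else r)
      = (if st.1.contains b then r.insert b (st.1.getD b "")
         else if st.2.1.contains b then r.insert b (st.2.1.getD b "") else r) := by
    intro r b hb
    simp only [PySem.Dict.contains_eq_isSome_get?, PySem.Dict.getD_eq_get?_getD,
      hex b hb, hlow b hb, pv_mk_get?]
    by_cases hlb : PySem.Str.lower b = b
    · rw [hlb]
      cases hfb : assets.find? (fun p => p.1 == b) <;>
        simp [pvFirstHref, hfb, PySem.Dict.getD_eq_get?_getD, pv_mk_get?]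
    · cases hfb : assets.find? (fun p => p.1 == b) <;>
        cases hfl : assets.find? (fun p => p.1 == PySem.Str.lower b) <;>
          simp [pvFirstHref, hfb, hfl, hlb, PySem.Dict.getD_eq_get?_getD, pv_mk_get?]
  rw [PySem.List.foldl_congr_mem pvBandNames _ _ PySem.Dict.empty
    (fun r b hb => hstep r b hb)]
  have hcond : ∀ (r : PySem.Dict String String), ∀ p ∈ assets,
      (if (PySem.Str.isIn "tif" (PySem.Str.lower p.1) || PySem.Str.isIn "geotiff" (PySem.Str.lower p.1)) then
         r.insert p.1 ((PySem.Dict.mk p.2).getD "href" "") else r)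
      = (if PySem.Str.isIn "tif" (PySem.Str.lower p.1) then
         r.insert p.1 ((PySem.Dict.mk p.2).getD "href" "") else r) := by
    intro r p _
    rw [pv_tif_or_geotiff]
  rw [PySem.List.foldl_congr_mem assets _ _ _ hcond]
  rw [PySem.List.foldl_if_eq_foldl_filter]
  rw [htifs, List.foldl_map]

-- ===== VERDICT (by name: the statement is the Claim_ definition above) =====
theorem get_relevant_assets_py_spec : Claim_equal_get_relevant_assets_py := by
  intro assets _
  unfold Spec_get_relevant_assets_py
  exact pv_main assets
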